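-- pv_equiv track=rewrite | github.com/HomingHamster/scale_and_chord_generator | main.py | is_consonant_chord
-- ===== SOURCE A (Python) =====
-- def is_consonant_chord(chord):
--     consonant_intervals = [0, 3, 4, 7, 8, 9, 12]
--     for i in range(len(chord)):
--         for j in range(i + 1, len(chord)):
--             interval = (chord[j] - chord[i]) % 12
--             if interval not in consonant_intervals:
--                 return False
--     return True
-- ===== SOURCE B (Python) =====
-- def is_consonant_chord(chord):
--     # Two-phase: one pass records the first and last index of each of the (at most 12)
--     # pitch classes; then only realized ordered class-pairs (first[p] < last[q]) are checked.
--     consonant = (0, 3, 4, 7, 8, 9)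
--     first = {}
--     last = {}
--     for idx, x in enumerate(chord):
--         r = x % 12
--         if r not in first:
--             first[r] = idx
--         last[r] = idx
--     for p in first:
--         for q in last:
--             if p != q and first[p] < last[q] and (q - p) % 12 not in consonant:
--                 return False
--     return True
-- ===== Notes on version B (the rewrite author's own statement) =====
-- stated objective: faster
-- what changed: Replaces A's O(n^2) all-pairs index scan by a two-phase algorithm: one pass records the first and last index of each of the at most 12 pitch classes, then only realized ordered class-pairs (first[p] < last[q]) are checked, O(n + 144) total.
import Mathlib
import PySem

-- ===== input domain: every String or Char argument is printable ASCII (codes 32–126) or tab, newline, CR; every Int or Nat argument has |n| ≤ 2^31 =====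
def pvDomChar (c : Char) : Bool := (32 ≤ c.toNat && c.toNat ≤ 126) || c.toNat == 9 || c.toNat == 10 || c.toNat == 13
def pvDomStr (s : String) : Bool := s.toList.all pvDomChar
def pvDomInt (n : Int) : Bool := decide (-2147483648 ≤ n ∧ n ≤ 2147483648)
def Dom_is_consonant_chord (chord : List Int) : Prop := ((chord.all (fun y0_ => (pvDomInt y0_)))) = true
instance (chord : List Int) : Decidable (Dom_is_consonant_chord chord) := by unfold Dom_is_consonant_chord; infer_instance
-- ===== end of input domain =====

-- B replaces A's O(n^2) all-pairs scan by a two-phase algorithm: one pass records the first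
-- and last index of each of the at most 12 pitch classes, then only realized ordered
-- class-pairs (first[p] < last[q]) are checked — O(n + 144) (objective: faster).

-- ===== PORT A =====
-- for i in range(len(chord)): for j in range(i+1, len(chord)): if (chord[j]-chord[i]) % 12 not in consonant_intervals: return False
def is_consonant_chord (chord : List Int) : Bool :=
  (PySem.List.pyRange 0 chord.length 1).all (fun i =>
    (PySem.List.pyRange (i + 1) chord.length 1).all (fun j =>
      [0, 3, 4, 7, 8, 9, 12].contains
        (PySem.Int.mod (PySem.List.pyGetD chord j 0 - PySem.List.pyGetD chord i 0) 12)))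

-- ===== PORT B =====
-- for idx, x in enumerate(chord): r = x % 12; if r not in first: first[r] = idx; last[r] = idx
def bScan : List (Int × Int) → PySem.Dict Int Int → PySem.Dict Int Int →
    PySem.Dict Int Int × PySem.Dict Int Int
  | [], F, L => (F, L)
  | (idx, x) :: rest, F, L =>
    let r := PySem.Int.mod x 12
    bScan rest (if F.contains r then F else F.insert r idx) (L.insert r idx)

-- for p in first: for q in last: if p != q and first[p] < last[q] and (q-p) % 12 not in consonant: return False
def is_consonant_chord_alt (chord : List Int) : Bool :=
  let FL := bScan (PySem.List.enumerate chord) PySem.Dict.empty PySem.Dict.empty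
  FL.1.keys.all (fun p => FL.2.keys.all (fun q =>
    !(p != q && FL.1.getD p 0 < FL.2.getD q 0 &&
      !([0, 3, 4, 7, 8, 9].contains (PySem.Int.mod (q - p) 12)))))

-- ===== PRECONDITION & SPEC =====
def Spec_is_consonant_chord (chord : List Int) (out : Bool) : Prop := out = is_consonant_chord_alt chord
instance (chord : List Int) (out : Bool) : Decidable (Spec_is_consonant_chord chord out) := by unfold Spec_is_consonant_chord; infer_instance

-- ===== CLAIM (what is proved, stated in full; the proofs are below) =====
def Claim_equal_is_consonant_chord : Prop := ∀ (chord : List Int), Dom_is_consonant_chord chord → Spec_is_consonant_chord chord (is_consonant_chord chord)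

-- ===== LEMMAS AND PROOFS =====

-- the pairwise test both programs decide
def pvOk (x y : Int) : Bool := [0, 3, 4, 7, 8, 9].contains ((y - x) % 12)

-- first / last index (counting from s) whose element has pitch class r
def fI : List Int → Int → Int → Option Int
  | [], _, _ => none
  | x :: rest, s, r => if x % 12 = r then some s else fI rest (s + 1) r

def lI : List Int → Int → Int → Option Int
  | [], _, _ => none
  | x :: rest, s, r =>
    match lI rest (s + 1) r with
    | some j => some j
    | none => if x % 12 = r then some s else none

lemma pymod12 (x : Int) : PySem.Int.mod x 12 = x % 12 :=
  PySem.Int.mod_eq_emod_of_pos (by norm_num : (0:ℤ) < 12)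

lemma mod12_ne_12 (n : Int) : n % 12 ≠ 12 := by
  have := Int.emod_lt_of_pos n (by norm_num : (0:ℤ) < 12); omega

-- A's element test (with the unreachable 12) is pvOk
lemma a_test_eq (x y : Int) :
    [0, 3, 4, 7, 8, 9, 12].contains (PySem.Int.mod (y - x) 12) = pvOk x y := by
  rw [pymod12]
  have h := mod12_ne_12 (y - x)
  unfold pvOk
  rw [Bool.eq_iff_iff]
  simp [List.mem_cons, h]

-- B's class-pair test equals pvOk on the originals
lemma b_test_eq (x y : Int) :
    [0, 3, 4, 7, 8, 9].contains (PySem.Int.mod (y % 12 - x % 12) 12) = pvOk x y := by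
  rw [pymod12]
  unfold pvOk
  rw [← Int.sub_emod]

lemma a_char (chord : List Int) :
    is_consonant_chord chord = true ↔ chord.Pairwise (fun x y => pvOk x y = true) := by
  unfold is_consonant_chord
  rw [List.pairwise_iff_getElem]
  simp only [List.all_eq_true, PySem.List.mem_pyRange_one]
  constructor
  · intro h i j hi hj hij
    have h0i : (0:Int) ≤ (i:Int) := by exact_mod_cast Nat.zero_le i
    have hilen : (i:Int) < chord.length := by exact_mod_cast hi
    have hjlen : (j:Int) < chord.length := by exact_mod_cast hj
    have hij' : (i:Int) + 1 ≤ (j:Int) := by exact_mod_cast hij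
    have := h (i:Int) ⟨h0i, hilen⟩ (j:Int) ⟨hij', hjlen⟩
    rw [a_test_eq,
        PySem.List.pyGetD_of_nonneg chord 0 h0i,
        PySem.List.pyGetD_of_nonneg chord 0 (by positivity : (0:Int) ≤ (j:Int))] at this
    simp only [Int.toNat_natCast] at this
    rwa [List.getD_eq_getElem chord 0 hi, List.getD_eq_getElem chord 0 hj] at this
  · intro h i ⟨h0i, hilen⟩ j ⟨hij, hjlen⟩
    have h0j : (0:Int) ≤ j := by omega
    rw [a_test_eq,
        PySem.List.pyGetD_of_nonneg chord 0 h0i,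
        PySem.List.pyGetD_of_nonneg chord 0 h0j,
        List.getD_eq_getElem chord 0 (by omega : i.toNat < chord.length),
        List.getD_eq_getElem chord 0 (by omega : j.toNat < chord.length)]
    exact h i.toNat j.toNat (by omega) (by omega) (by omega)

-- the scan's dicts, characterised by fI / lI
lemma bScan_get?_fst (l : List Int) : ∀ (s : Int) (F L : PySem.Dict Int Int) (r : Int),
    (bScan (PySem.List.enumerate l s) F L).1.get? r =
      match F.get? r with
      | some v => some v
      | none => fI l s r := by
  induction l with
  | nil =>
    intro s F L r
    cases h : F.get? r <;> simp [bScan, fI, PySem.List.enumerate_nil, h]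
  | cons x rest ih =>
    intro s F L r
    rw [PySem.List.enumerate_cons]
    show (bScan _ (if F.contains (PySem.Int.mod x 12) then F
          else F.insert (PySem.Int.mod x 12) s) _).1.get? r = _
    rw [ih]
    simp only [pymod12]
    by_cases hc : F.contains (x % 12)
    · rw [if_pos hc]
      rw [PySem.Dict.contains_eq_isSome_get?] at hc
      rcases hFr : F.get? r with _ | v
      · simp only [fI]
        rw [if_neg]
        intro he
        rw [he, hFr] at hc; simp at hc
      · rfl
    · rw [if_neg hc]
      by_cases hr : x % 12 = r
      · subst hr
        rw [PySem.Dict.get?_insert_self]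
        rw [PySem.Dict.contains_eq_isSome_get?] at hc
        rcases hFr : F.get? (x % 12) with _ | v
        · simp [fI]
        · rw [hFr] at hc; simp at hc
      · rw [PySem.Dict.get?_insert_of_ne _ _ (fun h => hr h.symm)]
        cases F.get? r
        · simp [fI, hr]
        · rfl

lemma bScan_get?_snd (l : List Int) : ∀ (s : Int) (F L : PySem.Dict Int Int) (r : Int),
    (bScan (PySem.List.enumerate l s) F L).2.get? r =
      match lI l s r with
      | some v => some v
      | none => L.get? r := by
  induction l with
  | nil =>
    intro s F L r
    cases h : L.get? r <;> simp [bScan, lI, PySem.List.enumerate_nil, h]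
  | cons x rest ih =>
    intro s F L r
    rw [PySem.List.enumerate_cons]
    show (bScan _ _ (L.insert (PySem.Int.mod x 12) s)).2.get? r = _
    rw [ih]
    simp only [pymod12, lI]
    rcases lI rest (s + 1) r with _ | j
    · by_cases hr : x % 12 = r
      · subst hr; rw [PySem.Dict.get?_insert_self]; simp
      · rw [PySem.Dict.get?_insert_of_ne _ _ (fun h => hr h.symm)]
        simp [hr]
    · rfl

-- fI: soundness, minimality, totality (s = offset of index 0)
lemma fI_sound (l : List Int) : ∀ (s i r : Int), fI l s r = some i →
    ∃ (k : Nat) (hk : k < l.length), i = s + k ∧ l[k] % 12 = r := by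
  induction l with
  | nil => intro s i r h; simp [fI] at h
  | cons x rest ih =>
    intro s i r h
    simp only [fI] at h
    split_ifs at h with hx
    · injection h with h
      exact ⟨0, by simp, by simp [← h], by simpa using hx⟩
    · obtain ⟨k, hk, hi, hcl⟩ := ih (s + 1) i r h
      exact ⟨k + 1, by simpa using hk, by push_cast; omega, by simpa using hcl⟩

lemma fI_min (l : List Int) : ∀ (s i r : Int), fI l s r = some i →
    ∀ (k : Nat) (hk : k < l.length), l[k] % 12 = r → i ≤ s + k := by
  induction l with
  | nil => intro s i r h; simp [fI] at h
  | cons x rest ih =>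
    intro s i r h k hk hcl
    simp only [fI] at h
    split_ifs at h with hx
    · injection h with h; omega
    · cases k with
      | zero => simp at hcl; exact absurd hcl hx
      | succ m =>
        have := ih (s + 1) i r h m (by simpa using hk) (by simpa using hcl)
        push_cast; push_cast at this; omega

lemma fI_total (l : List Int) : ∀ (s r : Int) (k : Nat) (hk : k < l.length),
    l[k] % 12 = r → (fI l s r).isSome := by
  induction l with
  | nil => intro s r k hk; simp at hk
  | cons x rest ih =>
    intro s r k hk hcl
    simp only [fI]
    split_ifs with hx
    · simp
    · cases k with
      | zero => simp at hcl; exact absurd hcl hx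
      | succ m => exact ih (s + 1) r m (by simpa using hk) (by simpa using hcl)

-- lI: soundness, totality, maximality
lemma lI_sound (l : List Int) : ∀ (s i r : Int), lI l s r = some i →
    ∃ (k : Nat) (hk : k < l.length), i = s + k ∧ l[k] % 12 = r := by
  induction l with
  | nil => intro s i r h; simp [lI] at h
  | cons x rest ih =>
    intro s i r h
    simp only [lI] at h
    rcases hrec : lI rest (s + 1) r with _ | j <;> rw [hrec] at h
    · split_ifs at h with hx
      · injection h with h
        exact ⟨0, by simp, by simp [← h], by simpa using hx⟩
    · injection h with h
      rw [h] at hrec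
      obtain ⟨k, hk, hi, hcl⟩ := ih (s + 1) i r hrec
      exact ⟨k + 1, by simpa using hk, by push_cast; omega, by simpa using hcl⟩

lemma lI_total (l : List Int) : ∀ (s r : Int) (k : Nat) (hk : k < l.length),
    l[k] % 12 = r → (lI l s r).isSome := by
  induction l with
  | nil => intro s r k hk; simp at hk
  | cons x rest ih =>
    intro s r k hk hcl
    simp only [lI]
    rcases hrec : lI rest (s + 1) r with _ | j
    · cases k with
      | zero => simp at hcl; simp [hcl]
      | succ m =>
        have := ih (s + 1) r m (by simpa using hk) (by simpa using hcl)
        rw [hrec] at this; simp at this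
    · simp

lemma lI_max (l : List Int) : ∀ (s i r : Int), lI l s r = some i →
    ∀ (k : Nat) (hk : k < l.length), l[k] % 12 = r → s + k ≤ i := by
  induction l with
  | nil => intro s i r h; simp [lI] at h
  | cons x rest ih =>
    intro s i r h k hk hcl
    simp only [lI] at h
    rcases hrec : lI rest (s + 1) r with _ | j <;> rw [hrec] at h
    · split_ifs at h with hx
      · injection h with h
        cases k with
        | zero => omega
        | succ m =>
          have := lI_total rest (s + 1) r m (by simpa using hk) (by simpa using hcl)
          rw [hrec] at this; simp at this
    · injection h with h
      rw [h] at hrec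
      cases k with
      | zero =>
        obtain ⟨m, hm, hj, -⟩ := lI_sound rest (s + 1) i r hrec
        omega
      | succ m =>
        have := ih (s + 1) i r hrec m (by simpa using hk) (by simpa using hcl)
        push_cast; push_cast at this; omega

lemma b_char (chord : List Int) :
    is_consonant_chord_alt chord = true ↔ chord.Pairwise (fun x y => pvOk x y = true) := by
  unfold is_consonant_chord_alt
  have hF := bScan_get?_fst chord 0 PySem.Dict.empty PySem.Dict.empty
  have hL := bScan_get?_snd chord 0 PySem.Dict.empty PySem.Dict.empty
  simp only [PySem.Dict.get?_empty] at hF hL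
  set FL := bScan (PySem.List.enumerate chord 0) PySem.Dict.empty PySem.Dict.empty with hFL
  have hmemF : ∀ p : Int, p ∈ FL.1.keys ↔ (fI chord 0 p).isSome := by
    intro p
    rw [← PySem.Dict.contains_iff_mem_keys, PySem.Dict.contains_eq_isSome_get?, hF p]
  have hmemL : ∀ q : Int, q ∈ FL.2.keys ↔ (lI chord 0 q).isSome := by
    intro q
    rw [← PySem.Dict.contains_iff_mem_keys, PySem.Dict.contains_eq_isSome_get?, hL q]
    cases lI chord 0 q <;> simp
  have inner : ∀ p q : Int,
      (!(p != q && decide (FL.1.getD p 0 < FL.2.getD q 0) &&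
        !([0, 3, 4, 7, 8, 9].contains (PySem.Int.mod (q - p) 12)))) = true ↔
      (p ≠ q → FL.1.getD p 0 < FL.2.getD q 0 →
        [0, 3, 4, 7, 8, 9].contains (PySem.Int.mod (q - p) 12) = true) := by
    intro p q
    by_cases hpq : p = q <;>
      by_cases hlt : FL.1.getD p 0 < FL.2.getD q 0 <;>
        cases hb : [0, 3, 4, 7, 8, 9].contains (PySem.Int.mod (q - p) 12) <;>
          simp_all
  rw [List.pairwise_iff_getElem]
  simp only [List.all_eq_true]
  constructor
  · intro h i j hi hj hij
    set p := chord[i] % 12 with hp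
    set q := chord[j] % 12 with hq
    by_cases hpq : p = q
    · unfold pvOk
      rw [Int.sub_emod, ← hp, ← hq, ← hpq, sub_self]
      decide
    · rcases hfi : fI chord 0 p with _ | ip
      · exact absurd (fI_total chord 0 p i hi hp.symm) (by rw [hfi]; simp)
      rcases hli : lI chord 0 q with _ | jq
      · exact absurd (lI_total chord 0 q j hj hq.symm) (by rw [hli]; simp)
      have htest := (inner p q).1
        ((h p ((hmemF p).2 (by rw [hfi]; simp))) q ((hmemL q).2 (by rw [hli]; simp)))
      rw [← b_test_eq, ← hp, ← hq]
      apply htest hpq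
      rw [PySem.Dict.getD_eq_get?_getD, PySem.Dict.getD_eq_get?_getD, hF p, hL q, hfi, hli]
      have hip : ip ≤ (i : Int) := by
        have := fI_min chord 0 ip p hfi i hi hp.symm; omega
      have hjq : (j : Int) ≤ jq := by
        have := lI_max chord 0 jq q hli j hj hq.symm; omega
      have hij' : (i : Int) < (j : Int) := by exact_mod_cast hij
      simp only [Option.getD_some]
      omega
  · intro h p hpF q hqL
    rw [inner p q]
    intro hpq hlt
    rcases Option.isSome_iff_exists.1 ((hmemF p).1 hpF) with ⟨ip, hfi⟩
    rcases Option.isSome_iff_exists.1 ((hmemL q).1 hqL) with ⟨jq, hli⟩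
    obtain ⟨ki, hki, hipk, hclp⟩ := fI_sound chord 0 ip p hfi
    obtain ⟨kj, hkj, hjqk, hclq⟩ := lI_sound chord 0 jq q hli
    rw [PySem.Dict.getD_eq_get?_getD, PySem.Dict.getD_eq_get?_getD, hF p, hL q, hfi, hli] at hlt
    simp only [Option.getD_some] at hlt
    have hkij : ki < kj := by omega
    have := h ki kj hki hkj hkij
    rw [← b_test_eq, hclp, hclq] at this
    exact this

-- ===== VERDICT (by name: the statement is the Claim_ definition above) =====
theorem is_consonant_chord_spec : Claim_equal_is_consonant_chord := by
  intro chord _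
  unfold Spec_is_consonant_chord
  rw [Bool.eq_iff_iff, a_char, b_char]
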